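-- pv_equiv track=rewrite | github.com/nuetu/Procedural-Generation | waveFunction.py | newBlock
-- ===== SOURCE A (Python) =====
-- blocks = {
--     "zero":(0,0,0,0),
--     "one":(0,0,0,1),
--     "two":(0,0,1,0),
--     "three":(0,0,1,1),
--     "four":(0,1,0,0),
--     "five":(0,1,0,1),
--     "six":(0,1,1,0),
--     "seven":(0,1,1,1),
--     "eight":(1,0,0,0),
--     "nine":(1,0,0,1),
--     "ten":(1,0,1,0),
--     "eleven":(1,0,1,1),
--     "twelve":(1,1,0,0),
--     "thirteen":(1,1,0,1),
--     "fourteen":(1,1,1,0),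
--     "fifteen":(1,1,1,1),
-- }
--
-- def toCardinal(x):
--     if x in blocks:
--         x = blocks[x]
--     n,e,s,w = x
--     return n,e,s,w
--
-- def newBlock(north, east, south, west):
--     #faces of block to the x
--     if north in blocks:
--         north = blocks[north]
--     else:
--         north = blocks["zero"]
--     if east in blocks:
--         east = blocks[east]
--     else:
--         east = blocks["zero"]
--     if south in blocks:
--         south = blocks[south]
--     else:
--         south = blocks["zero"]
--     if west in blocks:
--         west = blocks[west]
--     else:
--         west = blocks["zero"]
--     new = (north[2],east[3],south[0],west[1])
--     for name, block in blocks.items():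
--         if (toCardinal(block) == toCardinal(new)):
--             return name
-- ===== SOURCE B (Python) =====
-- # The block names are the English numerals for 0..15 and each block's face
-- # tuple is just the 4-bit binary representation of that numeral, so the whole
-- # task is bit arithmetic: extract one bit from each neighbour's value and
-- # reassemble the new value.
-- NAMES = ["zero", "one", "two", "three", "four", "five", "six", "seven",
--          "eight", "nine", "ten", "eleven", "twelve", "thirteen", "fourteen",
--          "fifteen"]
--
-- def _value(x):
--     # numeric value of a block name; unknown names count as "zero"
--     try:
--         return NAMES.index(x)
--     except ValueError:
--         return 0
--
-- def newBlock(north, east, south, west):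
--     n, e, s, w = _value(north), _value(east), _value(south), _value(west)
--     # faces: block value v has tuple (v>>3&1, v>>2&1, v>>1&1, v&1);
--     # new block = (north[2], east[3], south[0], west[1])
--     idx = ((n >> 1) & 1) * 8 + (e & 1) * 4 + ((s >> 3) & 1) * 2 + ((w >> 2) & 1)
--     return NAMES[idx]
-- ===== Notes on version B (the rewrite author's own statement) =====
-- stated objective: alternative
-- what changed: B drops the face tuples and the reverse search entirely: the 16 names are the numerals 0..15 and each face tuple is that value's 4-bit binary form, so B converts each neighbour name to its number (list position, unknown -> 0), extracts the needed bit with shift/mask arithmetic, reassembles the new 4-bit value, and indexes the name list with it; A resolves tuples through the dict and linearly scans blocks.items() comparing tuples.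
import Mathlib
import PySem

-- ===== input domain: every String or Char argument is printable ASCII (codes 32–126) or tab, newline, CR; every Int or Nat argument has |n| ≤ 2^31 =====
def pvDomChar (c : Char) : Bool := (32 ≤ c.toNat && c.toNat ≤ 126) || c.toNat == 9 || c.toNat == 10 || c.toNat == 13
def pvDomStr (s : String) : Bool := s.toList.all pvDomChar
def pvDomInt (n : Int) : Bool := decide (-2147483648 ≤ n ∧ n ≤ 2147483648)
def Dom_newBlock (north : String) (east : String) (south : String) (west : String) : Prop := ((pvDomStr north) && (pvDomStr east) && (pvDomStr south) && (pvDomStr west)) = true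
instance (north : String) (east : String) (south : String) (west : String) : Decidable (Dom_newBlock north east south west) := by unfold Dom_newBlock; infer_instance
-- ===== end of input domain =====

-- B replaces A's tuple dict and reverse scan with bit arithmetic on the names' numeric values (alternative algorithm, similar cost).

-- ===== PORT A =====
-- the module-level dict `blocks`
def pyBlocks : PySem.Dict String (Int × Int × Int × Int) := PySem.Dict.ofList
  [("zero",(0,0,0,0)), ("one",(0,0,0,1)), ("two",(0,0,1,0)), ("three",(0,0,1,1)),
   ("four",(0,1,0,0)), ("five",(0,1,0,1)), ("six",(0,1,1,0)), ("seven",(0,1,1,1)),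
   ("eight",(1,0,0,0)), ("nine",(1,0,0,1)), ("ten",(1,0,1,0)), ("eleven",(1,0,1,1)),
   ("twelve",(1,1,0,0)), ("thirteen",(1,1,0,1)), ("fourteen",(1,1,1,0)), ("fifteen",(1,1,1,1))]

-- `if x in blocks: x = blocks[x] else: x = blocks["zero"]` (blocks["zero"] never KeyErrors, value (0,0,0,0))
def resolveA (x : String) : Int × Int × Int × Int :=
  match pyBlocks.get? x with
  | some v => v
  | none => (pyBlocks.get? "zero").getD (0,0,0,0)

-- toCardinal, as applied inside the loop: its argument is a tuple, for which `x in blocks`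
-- (membership among the string keys) is always False in Python, so it returns x unchanged
def toCardinalA (x : Int × Int × Int × Int) : Int × Int × Int × Int := x

-- the `for name, block in blocks.items(): if toCardinal(block) == toCardinal(new): return name` loop
def scanA (items : List (String × (Int × Int × Int × Int))) (nw : Int × Int × Int × Int) : Option String :=
  match items with
  | [] => none
  | (name, block) :: rest => if toCardinalA block = toCardinalA nw then some name else scanA rest nw

def newBlock (north : String) (east : String) (south : String) (west : String) : Option String :=
  let n := resolveA north
  let e := resolveA east
  let s := resolveA south
  let w := resolveA west
  let nw := (n.2.2.1, e.2.2.2, s.1, w.2.1)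
  scanA pyBlocks.items nw

-- ===== PORT B =====
-- NAMES = [...]
def namesB : List String :=
  ["zero", "one", "two", "three", "four", "five", "six", "seven",
   "eight", "nine", "ten", "eleven", "twelve", "thirteen", "fourteen", "fifteen"]

-- `NAMES.index(x)` with ValueError caught as 0; the values are nonnegative small ints,
-- on which Python's >>/& coincide exactly with Nat.shiftRight/Nat.land used below
def valueB (x : String) : Nat := (PySem.List.index? namesB x).getD 0

def newBlock_alt (north : String) (east : String) (south : String) (west : String) : Option String :=
  let n := valueB north
  let e := valueB east
  let s := valueB south
  let w := valueB west
  let idx := ((n >>> 1) &&& 1) * 8 + (e &&& 1) * 4 + ((s >>> 3) &&& 1) * 2 + ((w >>> 2) &&& 1)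
  PySem.List.pyGet? namesB (idx : Int)

-- ===== PRECONDITION & SPEC =====
def Spec_newBlock (north : String) (east : String) (south : String) (west : String) (out : Option String) : Prop := out = newBlock_alt north east south west
instance (north : String) (east : String) (south : String) (west : String) (out : Option String) : Decidable (Spec_newBlock north east south west out) := by unfold Spec_newBlock; infer_instance

-- ===== CLAIM (what is proved, stated in full; the proofs are below) =====
def Claim_equal_newBlock : Prop := ∀ (north : String) (east : String) (south : String) (west : String), Dom_newBlock north east south west → Spec_newBlock north east south west (newBlock north east south west)

-- ===== LEMMAS AND PROOFS =====

-- A's resolved tuple is exactly the 4-bit binary form of B's numeric value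
theorem resolveA_eq_bits (x : String) :
    resolveA x = ((((valueB x >>> 3) &&& 1 : Nat) : Int), (((valueB x >>> 2) &&& 1 : Nat) : Int),
                  (((valueB x >>> 1) &&& 1 : Nat) : Int), (((valueB x &&& 1 : Nat)) : Int)) := by
  by_cases hx : x ∈ namesB
  · simp only [namesB, List.mem_cons, List.not_mem_nil, or_false] at hx
    rcases hx with rfl|rfl|rfl|rfl|rfl|rfl|rfl|rfl|rfl|rfl|rfl|rfl|rfl|rfl|rfl|rfl <;> decide
  · have hkeys : pyBlocks.keys = namesB := by decide
    have h1 : pyBlocks.get? x = none := by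
      rw [PySem.Dict.get?_eq_none_iff_not_mem_keys, hkeys]; exact hx
    have h2 : PySem.List.index? namesB x = none := by
      rw [PySem.List.index?_eq_none_iff]; exact hx
    rw [PySem.List.index?_eq_idxOf?] at h2
    simp [resolveA, valueB, PySem.List.index?_eq_idxOf?, h1, h2]
    decide

-- A's scan over the 16 items returns the name at the bit-assembled position
theorem scan_eq_index (a b c d : Nat) (ha : a ≤ 1) (hb : b ≤ 1) (hc : c ≤ 1) (hd : d ≤ 1) :
    scanA pyBlocks.items ((c : Int), (d : Int), (a : Int), (b : Int)) =
      PySem.List.pyGet? namesB ((c * 8 + d * 4 + a * 2 + b : Nat) : Int) := by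
  interval_cases a <;> interval_cases b <;> interval_cases c <;> interval_cases d <;> decide

-- ===== VERDICT (by name: the statement is the Claim_ definition above) =====
theorem newBlock_spec : Claim_equal_newBlock := by
  intro north east south west _
  show newBlock north east south west = newBlock_alt north east south west
  unfold newBlock newBlock_alt
  rw [resolveA_eq_bits north, resolveA_eq_bits east, resolveA_eq_bits south, resolveA_eq_bits west]
  exact scan_eq_index _ _ _ _ (Nat.and_le_right) (Nat.and_le_right) (Nat.and_le_right) (Nat.and_le_right)
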